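-- pv_equiv track=rewrite | github.com/christ-pher/ransom-ir-toolkit | tools/babuk_key_tester/sosemanuk.py | _apply_sbox
-- ===== SOURCE A (Python) =====
-- _SBOX = [
--     # S0
--     [3, 8, 15, 1, 10, 6, 5, 11, 14, 13, 4, 2, 7, 0, 9, 12],
--     # S1
--     [15, 12, 2, 7, 9, 0, 5, 10, 1, 11, 14, 8, 6, 13, 3, 4],
--     # S2
--     [8, 6, 7, 9, 3, 12, 10, 15, 13, 1, 14, 4, 0, 11, 5, 2],
--     # S3
--     [0, 15, 11, 8, 12, 9, 6, 3, 13, 1, 2, 4, 10, 7, 5, 14],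
--     # S4
--     [1, 15, 8, 3, 12, 0, 11, 6, 2, 5, 4, 10, 9, 14, 7, 13],
--     # S5
--     [15, 5, 2, 11, 4, 10, 9, 12, 0, 3, 14, 8, 13, 6, 7, 1],
--     # S6
--     [7, 2, 12, 5, 8, 4, 6, 11, 14, 9, 1, 15, 13, 3, 10, 0],
--     # S7
--     [1, 13, 15, 0, 14, 8, 2, 11, 7, 4, 12, 10, 9, 3, 5, 6],
-- ]
--
-- def _apply_sbox(box_idx: int, w: list[int]) -> list[int]:
--     """Apply Serpent S-box in bitslice form to four 32-bit words.
--
--     For each bit position, extracts a 4-bit nibble across the four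
--     words, applies the S-box, and distributes the result back.
--     """
--     sbox = _SBOX[box_idx]
--     out = [0, 0, 0, 0]
--     for bit in range(32):
--         nibble = (
--             ((w[0] >> bit) & 1)
--             | (((w[1] >> bit) & 1) << 1)
--             | (((w[2] >> bit) & 1) << 2)
--             | (((w[3] >> bit) & 1) << 3)
--         )
--         result = sbox[nibble]
--         out[0] |= ((result >> 0) & 1) << bit
--         out[1] |= ((result >> 1) & 1) << bit
--         out[2] |= ((result >> 2) & 1) << bit
--         out[3] |= ((result >> 3) & 1) << bit
--     return out
-- ===== SOURCE B (Python) =====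
-- _SBOX = [
--     [3, 8, 15, 1, 10, 6, 5, 11, 14, 13, 4, 2, 7, 0, 9, 12],
--     [15, 12, 2, 7, 9, 0, 5, 10, 1, 11, 14, 8, 6, 13, 3, 4],
--     [8, 6, 7, 9, 3, 12, 10, 15, 13, 1, 14, 4, 0, 11, 5, 2],
--     [0, 15, 11, 8, 12, 9, 6, 3, 13, 1, 2, 4, 10, 7, 5, 14],
--     [1, 15, 8, 3, 12, 0, 11, 6, 2, 5, 4, 10, 9, 14, 7, 13],
--     [15, 5, 2, 11, 4, 10, 9, 12, 0, 3, 14, 8, 13, 6, 7, 1],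
--     [7, 2, 12, 5, 8, 4, 6, 11, 14, 9, 1, 15, 13, 3, 10, 0],
--     [1, 13, 15, 0, 14, 8, 2, 11, 7, 4, 12, 10, 9, 3, 5, 6],
-- ]
--
-- _MASK = 0xFFFFFFFF
--
--
-- def _apply_sbox(box_idx: int, w: list[int]) -> list[int]:
--     """Whole-word bitsliced S-box: instead of looping over the 32 bit
--     positions, loop over the 16 S-box entries; for entry v build in one
--     shot the 32-bit mask of the positions whose input nibble equals v,
--     and OR it into every output word whose bit is set in sbox[v]."""
--     sbox = _SBOX[box_idx]
--     x0, x1, x2, x3 = w[0] & _MASK, w[1] & _MASK, w[2] & _MASK, w[3] & _MASK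
--     n0, n1, n2, n3 = x0 ^ _MASK, x1 ^ _MASK, x2 ^ _MASK, x3 ^ _MASK
--     out = [0, 0, 0, 0]
--     for v in range(16):
--         m = ((x0 if v & 1 else n0) & (x1 if v & 2 else n1)
--              & (x2 if v & 4 else n2) & (x3 if v & 8 else n3))
--         r = sbox[v]
--         if r & 1:
--             out[0] |= m
--         if r & 2:
--             out[1] |= m
--         if r & 4:
--             out[2] |= m
--         if r & 8:
--             out[3] |= m
--     return out
-- ===== Notes on version B (the rewrite author's own statement) =====
-- stated objective: faster
-- what changed: Instead of looping over the 32 bit positions and rebuilding a 4-bit nibble per position, B loops once over the 16 S-box entries, building for each entry v a whole-32-bit-word mask of the positions whose input nibble equals v (AND of the masked words or their complements) and OR-ing it into the output words selected by the bits of sbox[v].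
import Mathlib
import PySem

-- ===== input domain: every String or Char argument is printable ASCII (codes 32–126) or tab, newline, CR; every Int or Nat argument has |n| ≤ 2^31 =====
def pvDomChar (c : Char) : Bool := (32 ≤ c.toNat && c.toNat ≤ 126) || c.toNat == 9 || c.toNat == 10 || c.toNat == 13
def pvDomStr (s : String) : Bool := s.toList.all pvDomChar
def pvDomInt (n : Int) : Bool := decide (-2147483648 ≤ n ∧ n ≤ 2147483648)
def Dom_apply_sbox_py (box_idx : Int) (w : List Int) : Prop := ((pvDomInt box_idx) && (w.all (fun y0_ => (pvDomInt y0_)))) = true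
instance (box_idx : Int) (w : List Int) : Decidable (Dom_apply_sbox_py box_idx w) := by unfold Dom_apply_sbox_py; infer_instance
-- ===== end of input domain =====

-- B replaces A's 32-iteration per-bit-position loop by a 16-iteration loop over the
-- S-box entries using whole-word mask operations (measurably faster in Python).

-- ===== PORT A =====
def pvSBOX : List (List Int) := [
  [3, 8, 15, 1, 10, 6, 5, 11, 14, 13, 4, 2, 7, 0, 9, 12],
  [15, 12, 2, 7, 9, 0, 5, 10, 1, 11, 14, 8, 6, 13, 3, 4],
  [8, 6, 7, 9, 3, 12, 10, 15, 13, 1, 14, 4, 0, 11, 5, 2],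
  [0, 15, 11, 8, 12, 9, 6, 3, 13, 1, 2, 4, 10, 7, 5, 14],
  [1, 15, 8, 3, 12, 0, 11, 6, 2, 5, 4, 10, 9, 14, 7, 13],
  [15, 5, 2, 11, 4, 10, 9, 12, 0, 3, 14, 8, 13, 6, 7, 1],
  [7, 2, 12, 5, 8, 4, 6, 11, 14, 9, 1, 15, 13, 3, 10, 0],
  [1, 13, 15, 0, 14, 8, 2, 11, 7, 4, 12, 10, 9, 3, 5, 6]]

-- one iteration of A's `for bit in range(32)` loop; accumulator = the list `out` as a 4-tuple.
-- `bit.toNat` is exact: bit comes from range(32), so it is nonnegative.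
-- `pyGetD … 0` is exact under Pre_ (indices 0..3 in range; nibble is always in 0..15,
-- in range for the 16-entry selected sbox).
def pvStepA (sbox w : List Int) (o : Int × Int × Int × Int) (bit : Int) : Int × Int × Int × Int :=
  let nibble :=
    PySem.Int.bor (PySem.Int.bor (PySem.Int.bor
      (PySem.Int.band (PySem.List.pyGetD w 0 0 >>> bit.toNat) 1)
      ((PySem.Int.band (PySem.List.pyGetD w 1 0 >>> bit.toNat) 1) <<< (1 : Nat)))
      ((PySem.Int.band (PySem.List.pyGetD w 2 0 >>> bit.toNat) 1) <<< (2 : Nat)))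
      ((PySem.Int.band (PySem.List.pyGetD w 3 0 >>> bit.toNat) 1) <<< (3 : Nat))
  let result := PySem.List.pyGetD sbox nibble 0
  (PySem.Int.bor o.1 ((PySem.Int.band (result >>> (0 : Nat)) 1) <<< bit.toNat),
   PySem.Int.bor o.2.1 ((PySem.Int.band (result >>> (1 : Nat)) 1) <<< bit.toNat),
   PySem.Int.bor o.2.2.1 ((PySem.Int.band (result >>> (2 : Nat)) 1) <<< bit.toNat),
   PySem.Int.bor o.2.2.2 ((PySem.Int.band (result >>> (3 : Nat)) 1) <<< bit.toNat))

def apply_sbox_py (box_idx : Int) (w : List Int) : List Int :=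
  let sbox := PySem.List.pyGetD pvSBOX box_idx []   -- exact under Pre_ (-8 ≤ box_idx < 8)
  let o := (PySem.List.pyRange 0 32).foldl (pvStepA sbox w) (0, 0, 0, 0)
  [o.1, o.2.1, o.2.2.1, o.2.2.2]

-- ===== PORT B =====
def pvMASK : Int := 4294967295

-- one iteration of B's `for v in range(16)` loop ('x if v & 1 else n' = truthiness of v & 1).
def pvStepB (sbox : List Int) (x0 x1 x2 x3 n0 n1 n2 n3 : Int)
    (o : Int × Int × Int × Int) (v : Int) : Int × Int × Int × Int :=
  let m := PySem.Int.band (PySem.Int.band (PySem.Int.band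
      (if PySem.Int.band v 1 ≠ 0 then x0 else n0)
      (if PySem.Int.band v 2 ≠ 0 then x1 else n1))
      (if PySem.Int.band v 4 ≠ 0 then x2 else n2))
      (if PySem.Int.band v 8 ≠ 0 then x3 else n3)
  let r := PySem.List.pyGetD sbox v 0   -- exact: v ∈ 0..15 in range for the 16-entry sbox
  ((if PySem.Int.band r 1 ≠ 0 then PySem.Int.bor o.1 m else o.1),
   (if PySem.Int.band r 2 ≠ 0 then PySem.Int.bor o.2.1 m else o.2.1),
   (if PySem.Int.band r 4 ≠ 0 then PySem.Int.bor o.2.2.1 m else o.2.2.1),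
   (if PySem.Int.band r 8 ≠ 0 then PySem.Int.bor o.2.2.2 m else o.2.2.2))

def apply_sbox_py_alt (box_idx : Int) (w : List Int) : List Int :=
  let sbox := PySem.List.pyGetD pvSBOX box_idx []   -- exact under Pre_ (-8 ≤ box_idx < 8)
  let x0 := PySem.Int.band (PySem.List.pyGetD w 0 0) pvMASK
  let x1 := PySem.Int.band (PySem.List.pyGetD w 1 0) pvMASK
  let x2 := PySem.Int.band (PySem.List.pyGetD w 2 0) pvMASK
  let x3 := PySem.Int.band (PySem.List.pyGetD w 3 0) pvMASK
  let n0 := PySem.Int.bxor x0 pvMASK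
  let n1 := PySem.Int.bxor x1 pvMASK
  let n2 := PySem.Int.bxor x2 pvMASK
  let n3 := PySem.Int.bxor x3 pvMASK
  let o := (PySem.List.pyRange 0 16).foldl (pvStepB sbox x0 x1 x2 x3 n0 n1 n2 n3) (0, 0, 0, 0)
  [o.1, o.2.1, o.2.2.1, o.2.2.2]

-- ===== PRECONDITION & SPEC =====
-- Pre_ = exactly the inputs where Python A returns: _SBOX[box_idx] needs -8 ≤ box_idx < 8
-- (Python's negative indexing wraps) and w[0]..w[3] need at least four elements; otherwise
-- A raises IndexError.
def Pre_apply_sbox_py (box_idx : Int) (w : List Int) : Prop :=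
  (-8 ≤ box_idx ∧ box_idx < 8) ∧ 4 ≤ w.length
instance (box_idx : Int) (w : List Int) : Decidable (Pre_apply_sbox_py box_idx w) := by
  unfold Pre_apply_sbox_py; infer_instance

def pvWitness_apply_sbox_py : Int × List Int := (2, [7, -3, 2147483647, 12345])

def Spec_apply_sbox_py (box_idx : Int) (w : List Int) (out : List Int) : Prop := out = apply_sbox_py_alt box_idx w
instance (box_idx : Int) (w : List Int) (out : List Int) : Decidable (Spec_apply_sbox_py box_idx w out) := by unfold Spec_apply_sbox_py; infer_instance

-- ===== CLAIM (what is proved, stated in full; the proofs are below) =====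
def Claim_equal_apply_sbox_py : Prop := ∀ (box_idx : Int) (w : List Int), Dom_apply_sbox_py box_idx w → Pre_apply_sbox_py box_idx w → Spec_apply_sbox_py box_idx w (apply_sbox_py box_idx w)

-- ===== LEMMAS AND PROOFS =====

-- Python's two's-complement bit k of an arbitrary int
def pvBit (x : Int) (k : Nat) : Bool :=
  match x with
  | .ofNat n => n.testBit k
  | .negSucc n => !n.testBit k

def pvB2N (b : Bool) : Nat := cond b 1 0

-- the nibble A assembles at bit position k (as a Nat)
def pvNib (w0 w1 w2 w3 : Int) (k : Nat) : Nat :=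
  pvB2N (pvBit w0 k) ||| (pvB2N (pvBit w1 k) <<< 1) ||| (pvB2N (pvBit w2 k) <<< 2) |||
    (pvB2N (pvBit w3 k) <<< 3)

-- OR-accumulation of g 0, …, g (t-1)
def pvOr (g : Nat → Nat) (t : Nat) : Nat := (List.range t).foldl (fun acc v => acc ||| g v) 0

-- Python's  x & 0xFFFFFFFF  as a Nat
def pvXN (x : Int) : Nat :=
  match x with
  | .ofNat n => n % 2 ^ 32
  | .negSucc n => 2 ^ 32 - 1 - n % 2 ^ 32

lemma pv_and_one (n k : Nat) : (n >>> k) &&& 1 = pvB2N (n.testBit k) := by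
  rcases h : n.testBit k with _|_ <;> simp [Nat.testBit] at h ⊢ <;>
    simp [pvB2N, h]

lemma pv_one_and (n k : Nat) : 1 &&& (n >>> k) = pvB2N (n.testBit k) := by
  rw [Nat.and_comm]; exact pv_and_one n k

lemma pv_band_shift_one (x : Int) (k : Nat) :
    PySem.Int.band (x >>> k) 1 = ((pvB2N (pvBit x k) : Nat) : Int) := by
  cases x with
  | ofNat n =>
    have h1 : ((Int.ofNat n) >>> k) = ((n >>> k : Nat) : Int) := rfl
    rw [h1, PySem.Int.band_of_nonneg (by positivity) (by norm_num),
      Int.toNat_natCast, show (1 : Int).toNat = 1 from rfl, pv_and_one]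
    rfl
  | negSucc n =>
    have h1 : (Int.negSucc n) >>> k = Int.negSucc (n >>> k) := rfl
    rw [h1]
    have hneg : ¬ (0 : Int) ≤ Int.negSucc (n >>> k) := by
      exact Int.not_le.mpr (Int.negSucc_lt_zero _)
    simp only [PySem.Int.band, if_neg hneg, if_pos (by norm_num : (0:Int) ≤ 1)]
    have h2 : (-(Int.negSucc (n >>> k)) - 1).toNat = n >>> k := by
      rw [Int.neg_negSucc]; omega
    rw [h2, show (1 : Int).toNat = 1 from rfl, pv_one_and]
    rcases h : n.testBit k with _|_ <;> simp [pvBit, h, pvB2N]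

lemma pv_band_pow_ne (x : Int) (i : Nat) :
    (PySem.Int.band x ((2 ^ i : Nat) : Int) ≠ 0) ↔ pvBit x i = true := by
  cases x with
  | ofNat n =>
    rw [show (Int.ofNat n) = ((n : Nat) : Int) from rfl,
      PySem.Int.band_of_nonneg (by positivity) (by positivity),
      Int.toNat_natCast, Int.toNat_natCast, Nat.and_two_pow]
    rcases h : n.testBit i with _|_ <;> simp [pvBit, h]
  | negSucc n =>
    have hneg : ¬ (0 : Int) ≤ Int.negSucc n := Int.not_le.mpr (Int.negSucc_lt_zero _)
    simp only [PySem.Int.band, if_neg hneg, if_pos (by positivity : (0:Int) ≤ ((2^i : Nat) : Int))]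
    have h2 : (-(Int.negSucc n) - 1).toNat = n := by rw [Int.neg_negSucc]; omega
    rw [h2, Int.toNat_natCast, Nat.and_comm, Nat.and_two_pow]
    rcases h : n.testBit i with _|_
    · simp [pvBit, h]
    · simp [pvBit, h]

lemma pv_band_mask (x : Int) : PySem.Int.band x pvMASK = ((pvXN x : Nat) : Int) := by
  have hM : pvMASK = (((2 ^ 32 - 1 : Nat) : Nat) : Int) := by norm_num [pvMASK]
  cases x with
  | ofNat n =>
    rw [show (Int.ofNat n) = ((n : Nat) : Int) from rfl, hM,
      PySem.Int.band_of_nonneg (by positivity) (by positivity),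
      Int.toNat_natCast, Int.toNat_natCast, Nat.and_two_pow_sub_one_eq_mod]
    rfl
  | negSucc n =>
    have hneg : ¬ (0 : Int) ≤ Int.negSucc n := Int.not_le.mpr (Int.negSucc_lt_zero _)
    rw [hM]
    simp only [PySem.Int.band, if_neg hneg, if_pos (by positivity : (0:Int) ≤ ((2^32-1 : Nat) : Int))]
    have h2 : (-(Int.negSucc n) - 1).toNat = n := by rw [Int.neg_negSucc]; omega
    rw [h2, Int.toNat_natCast, Nat.and_comm, Nat.and_two_pow_sub_one_eq_mod]
    rfl

lemma pv_sub_mask_testBit (t m k : Nat) (h : m < 2 ^ t) :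
    (2 ^ t - 1 - m).testBit k = (decide (k < t) && !m.testBit k) := by
  induction t generalizing m k with
  | zero => interval_cases m; simp
  | succ t ih =>
    have hp : 2 ^ (t + 1) = 2 * 2 ^ t := by ring
    have hsplit : 2 ^ (t+1) - 1 - m = 2 * (2 ^ t - 1 - m / 2) + (1 - m % 2) := by omega
    have hhalf : m / 2 < 2 ^ t := by omega
    cases k with
    | zero =>
      rw [Nat.testBit_zero, Nat.testBit_zero, hsplit]
      rcases Nat.mod_two_eq_zero_or_one m with h2 | h2 <;> simp [h2]
    | succ k =>
      rw [Nat.testBit_succ, Nat.testBit_succ, hsplit]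
      have : (2 * (2 ^ t - 1 - m / 2) + (1 - m % 2)) / 2 = 2 ^ t - 1 - m / 2 := by omega
      rw [this, ih _ _ hhalf]
      simp

lemma pv_testBit_pvXN (x : Int) (k : Nat) :
    (pvXN x).testBit k = (decide (k < 32) && pvBit x k) := by
  cases x with
  | ofNat n =>
    rw [show pvXN (Int.ofNat n) = n % 2^32 from rfl, Nat.testBit_mod_two_pow,
      show pvBit (Int.ofNat n) k = n.testBit k from rfl]
  | negSucc n =>
    rw [show pvXN (Int.negSucc n) = 2^32 - 1 - n % 2^32 from rfl,
      pv_sub_mask_testBit 32 _ k (Nat.mod_lt _ (by positivity)),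
      show pvBit (Int.negSucc n) k = !n.testBit k from rfl,
      Nat.testBit_mod_two_pow]
    by_cases hk : k < 32 <;> simp [hk]

lemma pv_testBit_pvOr (g : Nat → Nat) (t j : Nat) :
    (pvOr g t).testBit j = (List.range t).any (fun v => (g v).testBit j) := by
  induction t with
  | zero => simp [pvOr]
  | succ t ih =>
    rw [pvOr, List.range_succ, List.foldl_append, List.any_append]
    simp only [List.foldl_cons, List.foldl_nil, List.any_cons, List.any_nil]
    rw [show (List.range t).foldl (fun acc v => acc ||| g v) 0 = pvOr g t from rfl,
      Nat.testBit_or, ih]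
    simp

def pvGA (sbox w : List Int) (i k : Nat) : Nat :=
  pvB2N (pvBit (PySem.List.pyGetD sbox
    ((pvNib (PySem.List.pyGetD w 0 0) (PySem.List.pyGetD w 1 0)
      (PySem.List.pyGetD w 2 0) (PySem.List.pyGetD w 3 0) k : Nat) : Int) 0) i) <<< k

lemma pv_stepA_cast (sbox w : List Int) (a0 a1 a2 a3 t : Nat) :
    pvStepA sbox w (↑a0, ↑a1, ↑a2, ↑a3) (↑t : Int) =
      (↑(a0 ||| pvGA sbox w 0 t), ↑(a1 ||| pvGA sbox w 1 t),
       ↑(a2 ||| pvGA sbox w 2 t), ↑(a3 ||| pvGA sbox w 3 t)) := by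
  simp only [pvStepA, pvGA, pvNib, Int.toNat_natCast, pv_band_shift_one,
    ← Int.natCast_shiftLeft, PySem.Int.bor_natCast]

lemma pv_foldA (sbox w : List Int) (t : Nat) :
    ((List.range t).map (fun k : Nat => (k : Int))).foldl (pvStepA sbox w) (0, 0, 0, 0) =
      (↑(pvOr (pvGA sbox w 0) t), ↑(pvOr (pvGA sbox w 1) t),
       ↑(pvOr (pvGA sbox w 2) t), ↑(pvOr (pvGA sbox w 3) t)) := by
  induction t with
  | zero => simp [pvOr]
  | succ t ih =>
    rw [List.range_succ, List.map_append, List.foldl_append, ih]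
    simp only [List.map_cons, List.map_nil, List.foldl_cons, List.foldl_nil]
    rw [pv_stepA_cast]
    have h : ∀ i : Nat → Nat, pvOr i (t+1) = pvOr i t ||| i t := by
      intro i; rw [pvOr, List.range_succ, List.foldl_append]; rfl
    rw [h, h, h, h]

lemma pvc0 (x : Int) : (PySem.Int.band x 1 ≠ 0) ↔ pvBit x 0 = true := by
  simpa using pv_band_pow_ne x 0
lemma pvc1 (x : Int) : (PySem.Int.band x 2 ≠ 0) ↔ pvBit x 1 = true := by
  simpa using pv_band_pow_ne x 1
lemma pvc2 (x : Int) : (PySem.Int.band x 4 ≠ 0) ↔ pvBit x 2 = true := by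
  simpa using pv_band_pow_ne x 2
lemma pvc3 (x : Int) : (PySem.Int.band x 8 ≠ 0) ↔ pvBit x 3 = true := by
  simpa using pv_band_pow_ne x 3
lemma pvBit_natCast (u : Nat) (j : Nat) : pvBit (u : Int) j = u.testBit j := rfl

def pvGB (sbox : List Int) (X0 X1 X2 X3 N0 N1 N2 N3 : Nat) (i v : Nat) : Nat :=
  if pvBit (PySem.List.pyGetD sbox (v : Int) 0) i then
    (((if v.testBit 0 then X0 else N0) &&& (if v.testBit 1 then X1 else N1)) &&&
     (if v.testBit 2 then X2 else N2)) &&& (if v.testBit 3 then X3 else N3)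
  else 0

lemma pv_stepB_cast (sbox : List Int) (X0 X1 X2 X3 N0 N1 N2 N3 a0 a1 a2 a3 u : Nat) :
    pvStepB sbox ↑X0 ↑X1 ↑X2 ↑X3 ↑N0 ↑N1 ↑N2 ↑N3 (↑a0, ↑a1, ↑a2, ↑a3) (↑u : Int) =
      (↑(a0 ||| pvGB sbox X0 X1 X2 X3 N0 N1 N2 N3 0 u),
       ↑(a1 ||| pvGB sbox X0 X1 X2 X3 N0 N1 N2 N3 1 u),
       ↑(a2 ||| pvGB sbox X0 X1 X2 X3 N0 N1 N2 N3 2 u),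
       ↑(a3 ||| pvGB sbox X0 X1 X2 X3 N0 N1 N2 N3 3 u)) := by
  simp only [pvStepB, pvGB, pvc0, pvc1, pvc2, pvc3, pvBit_natCast]
  split_ifs <;> simp [PySem.Int.band_natCast, PySem.Int.bor_natCast]

lemma pv_foldB (sbox : List Int) (X0 X1 X2 X3 N0 N1 N2 N3 : Nat) (t : Nat) :
    ((List.range t).map (fun k : Nat => (k : Int))).foldl
        (pvStepB sbox ↑X0 ↑X1 ↑X2 ↑X3 ↑N0 ↑N1 ↑N2 ↑N3) (0, 0, 0, 0) =
      (↑(pvOr (pvGB sbox X0 X1 X2 X3 N0 N1 N2 N3 0) t),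
       ↑(pvOr (pvGB sbox X0 X1 X2 X3 N0 N1 N2 N3 1) t),
       ↑(pvOr (pvGB sbox X0 X1 X2 X3 N0 N1 N2 N3 2) t),
       ↑(pvOr (pvGB sbox X0 X1 X2 X3 N0 N1 N2 N3 3) t)) := by
  induction t with
  | zero => simp [pvOr]
  | succ t ih =>
    rw [List.range_succ, List.map_append, List.foldl_append, ih]
    simp only [List.map_cons, List.map_nil, List.foldl_cons, List.foldl_nil]
    rw [pv_stepB_cast]
    have h : ∀ i : Nat → Nat, pvOr i (t+1) = pvOr i t ||| i t := by
      intro i; rw [pvOr, List.range_succ, List.foldl_append]; rfl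
    rw [h, h, h, h]

lemma pv_testBit_b2n (b : Bool) (l : Nat) : (pvB2N b).testBit l = (b && decide (l = 0)) := by
  cases b <;> cases l <;> simp [pvB2N, Nat.testBit_succ]

lemma pv_testBit_gA (sbox w : List Int) (i k j : Nat) :
    (pvGA sbox w i k).testBit j =
      (decide (k = j) &&
        pvBit (PySem.List.pyGetD sbox
          ((pvNib (PySem.List.pyGetD w 0 0) (PySem.List.pyGetD w 1 0)
            (PySem.List.pyGetD w 2 0) (PySem.List.pyGetD w 3 0) k : Nat) : Int) 0) i) := by
  rw [pvGA, Nat.testBit_shiftLeft, pv_testBit_b2n]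
  by_cases h : k = j
  · subst h; simp
  · by_cases h2 : j ≥ k <;> simp [h, h2]
    omega

lemma pv_any_single (t n : Nat) (Q : Nat → Bool) :
    (List.range t).any (fun v => decide (v = n) && Q v) = (decide (n < t) && Q n) := by
  by_cases h : n < t
  · simp only [h, decide_true, Bool.true_and]
    rcases hq : Q n with _|_
    · rw [List.any_eq_false]
      intro v hv
      rcases hv2 : decide (v = n) with _|_
      · simp
      · have : v = n := of_decide_eq_true hv2
        subst this; simp [hq]
    · rw [List.any_eq_true]
      exact ⟨n, List.mem_range.mpr h, by simp [hq]⟩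
  · simp only [h, decide_false, Bool.false_and]
    rw [List.any_eq_false]
    intro v hv
    rcases hv2 : decide (v = n) with _|_
    · simp
    · have : v = n := of_decide_eq_true hv2
      subst this
      exact absurd (List.mem_range.mp hv) h

lemma pv_outA (sbox w : List Int) (i j : Nat) :
    (pvOr (pvGA sbox w i) 32).testBit j =
      (decide (j < 32) &&
        pvBit (PySem.List.pyGetD sbox
          ((pvNib (PySem.List.pyGetD w 0 0) (PySem.List.pyGetD w 1 0)
            (PySem.List.pyGetD w 2 0) (PySem.List.pyGetD w 3 0) j : Nat) : Int) 0) i) := by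
  rw [pv_testBit_pvOr]
  have := pv_any_single 32 j (fun k =>
    pvBit (PySem.List.pyGetD sbox
      ((pvNib (PySem.List.pyGetD w 0 0) (PySem.List.pyGetD w 1 0)
        (PySem.List.pyGetD w 2 0) (PySem.List.pyGetD w 3 0) k : Nat) : Int) 0) i)
  rw [← this]
  congr 1
  funext k
  rw [pv_testBit_gA]

lemma pv_nib_lt (w0 w1 w2 w3 : Int) (k : Nat) : pvNib w0 w1 w2 w3 k < 16 := by
  rw [pvNib]
  cases pvBit w0 k <;> cases pvBit w1 k <;> cases pvBit w2 k <;> cases pvBit w3 k <;> decide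

lemma pv_nib_eq' (v : Nat) (hv : v < 16) (b0 b1 b2 b3 : Bool) :
    ((((v.testBit 0 == b0) && (v.testBit 1 == b1)) && (v.testBit 2 == b2)) && (v.testBit 3 == b3)) =
      decide (v = (pvB2N b0 ||| (pvB2N b1 <<< 1) ||| (pvB2N b2 <<< 2) ||| (pvB2N b3 <<< 3))) := by
  interval_cases v <;> cases b0 <;> cases b1 <;> cases b2 <;> cases b3 <;> decide

lemma pv_testBit_sel (x : Int) (v l j : Nat) :
    ((if v.testBit l then pvXN x else pvXN x ^^^ 4294967295).testBit j) =
      (decide (j < 32) && (v.testBit l == pvBit x j)) := by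
  have hM : (4294967295 : Nat) = 2 ^ 32 - 1 := by norm_num
  by_cases h : v.testBit l
  · rw [if_pos h, pv_testBit_pvXN, h]
    cases pvBit x j <;> simp
  · rw [if_neg h, Nat.testBit_xor, pv_testBit_pvXN, hM, Nat.testBit_two_pow_sub_one,
      Bool.eq_false_iff.mpr h]
    by_cases hj : j < 32 <;> cases hb : pvBit x j <;> simp [hj]

lemma pv_any_congr {l : List Nat} {p q : Nat → Bool} (h : ∀ a ∈ l, p a = q a) :
    l.any p = l.any q := by
  induction l with
  | nil => rfl
  | cons x xs ih =>
    rw [List.any_cons, List.any_cons, h x (List.mem_cons_self), ih]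
    intro a ha
    exact h a (List.mem_cons_of_mem _ ha)

lemma pv_testBit_gB (sbox : List Int) (w0 w1 w2 w3 : Int) (i v j : Nat) (hv : v < 16) :
    (pvGB sbox (pvXN w0) (pvXN w1) (pvXN w2) (pvXN w3)
        (pvXN w0 ^^^ 4294967295) (pvXN w1 ^^^ 4294967295)
        (pvXN w2 ^^^ 4294967295) (pvXN w3 ^^^ 4294967295) i v).testBit j =
      (decide (v = pvNib w0 w1 w2 w3 j) &&
        (pvBit (PySem.List.pyGetD sbox (v : Int) 0) i && decide (j < 32))) := by
  rw [pvGB]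
  by_cases hr : pvBit (PySem.List.pyGetD sbox (v : Int) 0) i
  · rw [if_pos hr, Nat.testBit_and, Nat.testBit_and, Nat.testBit_and,
      pv_testBit_sel, pv_testBit_sel, pv_testBit_sel, pv_testBit_sel]
    by_cases hj : j < 32
    · simp only [hj, decide_true, Bool.true_and, hr, Bool.and_true]
      rw [pv_nib_eq' v hv (pvBit w0 j) (pvBit w1 j) (pvBit w2 j) (pvBit w3 j)]
      rw [pvNib]
    · simp [hj]
  · rw [if_neg hr]
    rw [Bool.not_eq_true] at hr
    rw [hr]
    simp

lemma pv_outB (sbox : List Int) (w0 w1 w2 w3 : Int) (i j : Nat) :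
    (pvOr (pvGB sbox (pvXN w0) (pvXN w1) (pvXN w2) (pvXN w3)
        (pvXN w0 ^^^ 4294967295) (pvXN w1 ^^^ 4294967295)
        (pvXN w2 ^^^ 4294967295) (pvXN w3 ^^^ 4294967295) i) 16).testBit j =
      (decide (j < 32) &&
        pvBit (PySem.List.pyGetD sbox ((pvNib w0 w1 w2 w3 j : Nat) : Int) 0) i) := by
  rw [pv_testBit_pvOr]
  have hcg : ((List.range 16).any fun v =>
      (pvGB sbox (pvXN w0) (pvXN w1) (pvXN w2) (pvXN w3)
        (pvXN w0 ^^^ 4294967295) (pvXN w1 ^^^ 4294967295)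
        (pvXN w2 ^^^ 4294967295) (pvXN w3 ^^^ 4294967295) i v).testBit j) =
      ((List.range 16).any fun v => decide (v = pvNib w0 w1 w2 w3 j) &&
        (pvBit (PySem.List.pyGetD sbox (v : Int) 0) i && decide (j < 32))) := by
    apply pv_any_congr
    intro v hvmem
    exact pv_testBit_gB sbox w0 w1 w2 w3 i v j (List.mem_range.mp hvmem)
  rw [hcg, pv_any_single 16 (pvNib w0 w1 w2 w3 j)
    (fun v => pvBit (PySem.List.pyGetD sbox (v : Int) 0) i && decide (j < 32))]
  simp only [pv_nib_lt w0 w1 w2 w3 j, decide_true, Bool.true_and]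
  cases pvBit (PySem.List.pyGetD sbox ((pvNib w0 w1 w2 w3 j : Nat) : Int) 0) i <;>
    cases hj : decide (j < 32) <;> simp_all

theorem pv_main (box_idx : Int) (w : List Int) :
    apply_sbox_py box_idx w = apply_sbox_py_alt box_idx w := by
  have hR32 : PySem.List.pyRange 0 32 = (List.range 32).map (fun k : Nat => (k : Int)) := by
    rw [show (32 : Int) = ((32 : Nat) : Int) by norm_num, PySem.List.pyRange_zero_natCast]
  have hR16 : PySem.List.pyRange 0 16 = (List.range 16).map (fun k : Nat => (k : Int)) := by
    rw [show (16 : Int) = ((16 : Nat) : Int) by norm_num, PySem.List.pyRange_zero_natCast]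
  have hMM : pvMASK = (((4294967295 : Nat) : Nat) : Int) := by norm_num [pvMASK]
  unfold apply_sbox_py apply_sbox_py_alt
  simp only [hR32, hR16, pv_band_mask]
  simp only [hMM, PySem.Int.bxor_natCast]
  simp only [pv_foldA, pv_foldB]
  have heq : ∀ i : Nat,
      pvOr (pvGA (PySem.List.pyGetD pvSBOX box_idx []) w i) 32 =
      pvOr (pvGB (PySem.List.pyGetD pvSBOX box_idx [])
        (pvXN (PySem.List.pyGetD w 0 0)) (pvXN (PySem.List.pyGetD w 1 0))
        (pvXN (PySem.List.pyGetD w 2 0)) (pvXN (PySem.List.pyGetD w 3 0))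
        (pvXN (PySem.List.pyGetD w 0 0) ^^^ 4294967295)
        (pvXN (PySem.List.pyGetD w 1 0) ^^^ 4294967295)
        (pvXN (PySem.List.pyGetD w 2 0) ^^^ 4294967295)
        (pvXN (PySem.List.pyGetD w 3 0) ^^^ 4294967295) i) 16 := by
    intro i
    apply Nat.eq_of_testBit_eq
    intro j
    rw [pv_outA, pv_outB]
  rw [heq 0, heq 1, heq 2, heq 3]

-- ===== VERDICT (by name: the statement is the Claim_ definition above) =====
theorem apply_sbox_py_spec : Claim_equal_apply_sbox_py := by
  intro box_idx w _ _
  unfold Spec_apply_sbox_py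
  exact pv_main box_idx w
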